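-- pv_equiv track=rewrite | github.com/nbrader/proofs-bird-meertens | Python/verify_mixed_case_tropical_fix.py | nonneg_sum
-- ===== SOURCE A (Python) =====
-- def nonneg_sum(xs):
--     """fold_right nonNegPlus 0 xs"""
--     def nonneg_plus(x, y):
--         result = x + y
--         return result if result >= 0 else 0
--
--     result = 0
--     for x in reversed(xs):
--         result = nonneg_plus(x, result)
--     return result
-- ===== SOURCE B (Python) =====
-- def nonneg_sum(xs):
--     """fold_right nonNegPlus 0 xs = max prefix sum clamped at 0, via one forward pass."""
--     total = 0
--     best = 0
--     for x in xs:
--         total += x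
--         if total > best:
--             best = total
--     return best
-- ===== Notes on version B (the rewrite author's own statement) =====
-- stated objective: alternative
-- what changed: Replaces the right-to-left fold of the clamped operator nonNegPlus with a forward single pass keeping an unclamped running sum and the running maximum prefix sum (clamped at 0), using fold_right(nonNegPlus,0) = max(0, max prefix sums).
import Mathlib
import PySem

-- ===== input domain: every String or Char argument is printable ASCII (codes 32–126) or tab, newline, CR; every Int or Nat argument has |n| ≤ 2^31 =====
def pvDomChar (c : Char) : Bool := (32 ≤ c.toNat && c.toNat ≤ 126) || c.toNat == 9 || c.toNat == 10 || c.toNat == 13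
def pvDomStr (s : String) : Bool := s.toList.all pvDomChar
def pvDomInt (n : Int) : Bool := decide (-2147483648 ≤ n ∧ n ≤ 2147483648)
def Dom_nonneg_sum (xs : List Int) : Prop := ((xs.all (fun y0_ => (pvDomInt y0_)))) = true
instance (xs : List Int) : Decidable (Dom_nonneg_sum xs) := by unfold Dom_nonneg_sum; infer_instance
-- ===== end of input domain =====

-- B replaces A's right-to-left clamped fold by a forward pass tracking the unclamped
-- running sum and the best (max) prefix sum, clamped at 0; objective: alternative decomposition.

-- ===== PORT A =====
def pvNonnegPlus (x y : Int) : Int :=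
  let result := x + y
  if result ≥ 0 then result else 0

def nonneg_sum (xs : List Int) : Int :=
  xs.reverse.foldl (fun result x => pvNonnegPlus x result) 0

-- ===== PORT B =====
def nonneg_sum_alt (xs : List Int) : Int :=
  (xs.foldl (fun (s : Int × Int) x =>
    let total := s.1 + x
    (total, if total > s.2 then total else s.2)) (0, 0)).2

-- ===== PRECONDITION & SPEC =====
def Spec_nonneg_sum (xs : List Int) (out : Int) : Prop := out = nonneg_sum_alt xs
instance (xs : List Int) (out : Int) : Decidable (Spec_nonneg_sum xs out) := by unfold Spec_nonneg_sum; infer_instance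

-- ===== CLAIM (what is proved, stated in full; the proofs are below) =====
def Claim_equal_nonneg_sum : Prop := ∀ (xs : List Int), Dom_nonneg_sum xs → Spec_nonneg_sum xs (nonneg_sum xs)

-- ===== LEMMAS AND PROOFS =====

theorem nonneg_sum_foldr (xs : List Int) :
    nonneg_sum xs = xs.foldr (fun x r => pvNonnegPlus x r) 0 := by
  simp [nonneg_sum, List.foldl_reverse]

theorem nonneg_sum_nonneg (xs : List Int) :
    0 ≤ xs.foldr (fun x r => pvNonnegPlus x r) 0 := by
  induction xs with
  | nil => simp
  | cons x xs ih =>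
    simp only [List.foldr_cons, pvNonnegPlus]
    split <;> omega

theorem alt_invariant (xs : List Int) (t b : Int) (h : t ≤ b) :
    (xs.foldl (fun (s : Int × Int) x =>
      let total := s.1 + x
      (total, if total > s.2 then total else s.2)) (t, b)).2
    = max b (t + xs.foldr (fun x r => pvNonnegPlus x r) 0) := by
  induction xs generalizing t b with
  | nil => simp; omega
  | cons x xs ih =>
    simp only [List.foldl_cons, List.foldr_cons]
    have h' : t + x ≤ if t + x > b then t + x else b := by split <;> omega
    rw [ih (t + x) _ h']
    have hnn := nonneg_sum_nonneg xs
    generalize (xs.foldr (fun x r => pvNonnegPlus x r) 0) = M at hnn ⊢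
    simp only [pvNonnegPlus, max_def]
    split_ifs <;> omega

-- ===== VERDICT (by name: the statement is the Claim_ definition above) =====
theorem nonneg_sum_spec : Claim_equal_nonneg_sum := by
  intro xs _
  unfold Spec_nonneg_sum nonneg_sum_alt
  rw [alt_invariant xs 0 0 le_rfl, nonneg_sum_foldr]
  have := nonneg_sum_nonneg xs
  omega
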